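-- pv_equiv track=rewrite | github.com/kunquat/kunquat | kunquat/legacy/tracker/tools.py | list_move
-- ===== SOURCE A (Python) =====
-- def list_move(lst, index, target):
--     '''
--     >>> l = [0, 1, 2]
--     >>> list_move(l, 0, 0)
--     [0, 1, 2]
--     >>> list_move(l, 0, 1)
--     [0, 1, 2]
--     >>> list_move(l, 0, 2)
--     [1, 0, 2]
--     >>> list_move(l, 0, 3)
--     [1, 2, 0]
--     >>> list_move(l, 1, 0)
--     [1, 0, 2]
--     >>> list_move(l, 1, 1)
--     [0, 1, 2]
--     >>> list_move(l, 1, 2)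
--     [0, 1, 2]
--     >>> list_move(l, 1, 3)
--     [0, 2, 1]
--     >>> list_move(l, 2, 0)
--     [2, 0, 1]
--     >>> list_move(l, 2, 1)
--     [0, 2, 1]
--     >>> list_move(l, 2, 2)
--     [0, 1, 2]
--     >>> list_move(l, 2, 3)
--     [0, 1, 2]
--     '''
--     def _list_move(lst, index, target):
--         item = lst[index]
--         for i, v in enumerate(lst):
--             if i == target:
--                 yield item
--             if i != index:
--                 yield v
--         if target == len(lst):
--                 yield item
--     result_generator = _list_move(lst, index, target)
--     result = list(result_generator)
--     return result
-- ===== SOURCE B (Python) =====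
-- def list_move(lst, index, target):
--     item = lst[index]
--     buckets = [[v] if i != index else [] for i, v in enumerate(lst)] + [[]]
--     if target in range(len(lst) + 1):
--         buckets[target] = [item] + buckets[target]
--     return [v for bucket in buckets for v in bucket]
-- ===== Notes on version B (the rewrite author's own statement) =====
-- stated objective: alternative
-- what changed: Replaces A's stateful interleaving generator pass (conditional yields plus a post-loop append) by a bucket scatter-gather: one bucket per output slot built by a comprehension, the moved item prepended into its slot's bucket if that slot exists, then a flatten.
import Mathlib
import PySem

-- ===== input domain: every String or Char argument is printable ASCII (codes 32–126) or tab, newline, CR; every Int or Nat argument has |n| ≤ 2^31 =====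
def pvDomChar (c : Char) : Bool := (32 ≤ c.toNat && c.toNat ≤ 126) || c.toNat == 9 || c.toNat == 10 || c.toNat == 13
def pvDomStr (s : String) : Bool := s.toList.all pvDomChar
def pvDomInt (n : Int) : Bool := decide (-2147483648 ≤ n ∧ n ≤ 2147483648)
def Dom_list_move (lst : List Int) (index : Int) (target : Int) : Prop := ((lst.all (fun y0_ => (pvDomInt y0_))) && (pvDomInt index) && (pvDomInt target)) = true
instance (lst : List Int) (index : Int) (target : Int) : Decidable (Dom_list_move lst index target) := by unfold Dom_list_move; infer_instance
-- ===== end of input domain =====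

-- B replaces A's stateful interleaving generator pass by a bucket scatter-gather
-- (one bucket per output slot, then a flatten); alternative decomposition, same cost.

-- ===== PORT A =====
def list_move (lst : List Int) (index : Int) (target : Int) : List Int :=
  match PySem.List.pyGet? lst index with
  | none => []  -- Python raises IndexError here; excluded by Pre_
  | some item =>
    let res := (PySem.List.enumerate lst).foldl
      (fun acc p =>
        let acc := if p.1 = target then acc ++ [item] else acc
        if p.1 ≠ index then acc ++ [p.2] else acc) []
    if target = (lst.length : Int) then res ++ [item] else res

-- ===== PORT B =====
def list_move_alt (lst : List Int) (index : Int) (target : Int) : List Int :=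
  match PySem.List.pyGet? lst index with
  | none => []  -- Python raises IndexError here; excluded by Pre_
  | some item =>
    let buckets := ((PySem.List.enumerate lst).map
      (fun p => if p.1 ≠ index then [p.2] else [])) ++ [[]]
    let buckets := if target ∈ PySem.List.pyRange 0 ((lst.length : Int) + 1) 1
      then PySem.List.pySetD buckets target ([item] ++ PySem.List.pyGetD buckets target [])
      else buckets
    buckets.flatMap id

-- ===== PRECONDITION & SPEC =====
-- Pre_ excludes exactly the inputs where lst[index] raises IndexError in A (and in B).
def Pre_list_move (lst : List Int) (index : Int) (target : Int) : Prop :=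
  PySem.Raise.InRange lst.length index

instance (lst : List Int) (index : Int) (target : Int) : Decidable (Pre_list_move lst index target) := by unfold Pre_list_move; infer_instance

def pvWitness_list_move : List Int × Int × Int := ([0, 1, 2], 1, 2)

def Spec_list_move (lst : List Int) (index : Int) (target : Int) (out : List Int) : Prop := out = list_move_alt lst index target
instance (lst : List Int) (index : Int) (target : Int) (out : List Int) : Decidable (Spec_list_move lst index target out) := by unfold Spec_list_move; infer_instance

-- ===== CLAIM (what is proved, stated in full; the proofs are below) =====
def Claim_equal_list_move : Prop := ∀ (lst : List Int) (index : Int) (target : Int), Dom_list_move lst index target → Pre_list_move lst index target → Spec_list_move lst index target (list_move lst index target)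

-- ===== LEMMAS AND PROOFS =====

-- the filter keeping indices < target is empty once the start index is ≥ target
theorem pv_before_nil (index target : Int) (xs : List Int) : ∀ (s : Int), target ≤ s →
    (PySem.List.enumerate xs s).filter
      (fun p => decide (p.1 ≠ index) && decide (p.1 < target)) = [] := by
  induction xs with
  | nil => intro s _; simp [PySem.List.enumerate_nil]
  | cons x t ih =>
    intro s hs
    rw [PySem.List.enumerate_cons]
    rw [List.filter_cons_of_neg (by simp; intro _; omega)]
    exact ih (s + 1) (by omega)

-- the filter keeping indices ≥ target is empty once all indices are < target
theorem pv_after_nil (index target : Int) (xs : List Int) : ∀ (s : Int), s + xs.length ≤ target →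
    (PySem.List.enumerate xs s).filter
      (fun p => decide (p.1 ≠ index) && decide (target ≤ p.1)) = [] := by
  induction xs with
  | nil => intro s _; simp [PySem.List.enumerate_nil]
  | cons x t ih =>
    intro s hs
    rw [PySem.List.enumerate_cons]
    simp only [List.length_cons] at hs
    push_cast at hs
    rw [List.filter_cons_of_neg (by simp; intro _; omega)]
    exact ih (s + 1) (by omega)

-- every index produced by enumerate starting at s is at least s
theorem pv_enum_lb (t : List Int) : ∀ (s a b : Int), (a, b) ∈ PySem.List.enumerate t s → s ≤ a := by
  induction t with
  | nil => intro s a b h; simp [PySem.List.enumerate_nil] at h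
  | cons x t ih =>
    intro s a b h
    rw [PySem.List.enumerate_cons] at h
    rcases List.mem_cons.mp h with h | h
    · rw [Prod.mk.injEq] at h; omega
    · have := ih (s + 1) a b h; omega

-- A's generator loop, characterised as before ++ (item if target falls in the scanned range) ++ after
theorem pv_loop (item index target : Int) (xs : List Int) : ∀ (s : Int) (acc : List Int),
    (PySem.List.enumerate xs s).foldl
      (fun acc p =>
        let acc := if p.1 = target then acc ++ [item] else acc
        if p.1 ≠ index then acc ++ [p.2] else acc) acc =
    acc ++ ((PySem.List.enumerate xs s).filter
      (fun p => decide (p.1 ≠ index) && decide (p.1 < target))).map Prod.snd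
        ++ (if s ≤ target ∧ target < s + xs.length then [item] else [])
        ++ ((PySem.List.enumerate xs s).filter
      (fun p => decide (p.1 ≠ index) && decide (target ≤ p.1))).map Prod.snd := by
  induction xs with
  | nil =>
    intro s acc
    rw [if_neg (by rintro ⟨h1, h2⟩; simp only [List.length_nil, Int.natCast_zero, add_zero] at h2; omega)]
    simp [PySem.List.enumerate_nil]
  | cons x t ih =>
    intro s acc
    rw [PySem.List.enumerate_cons]
    simp only [List.foldl_cons]
    rw [ih (s + 1)]
    simp only [List.length_cons]
    push_cast
    rcases lt_trichotomy s target with hst | hst | hst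
    · -- s < target : head (if kept) goes to 'before', item not yet emitted
      have hmid : (s ≤ target ∧ target < s + ((t.length : Int) + 1)) ↔
          (s + 1 ≤ target ∧ target < s + 1 + (t.length : Int)) := by constructor <;> (intro h; omega)
      rw [if_neg (by omega : ¬ s = target)]
      rw [if_congr hmid rfl rfl]
      by_cases hi : s = index
      · subst hi
        simp [hst, List.append_assoc]
      · simp [hi, hst, List.append_assoc]
    · -- s = target : item emitted here, head (if kept) goes to 'after'
      subst hst
      rw [pv_before_nil index s t (s+1) (by omega)]
      rw [if_neg (by omega : ¬ (s + 1 ≤ s ∧ s < s + 1 + (t.length : Int)))]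
      have h3 : s ≤ s ∧ s < s + ((t.length : Int) + 1) := by
        have : (0:Int) ≤ (t.length : Int) := Int.natCast_nonneg _
        omega
      by_cases hi : s = index
      · subst hi
        simp [h3, List.append_assoc]
        intro a b hab _
        have := pv_enum_lb t (s + 1) a b hab
        omega
      · simp [hi, h3, List.append_assoc]
        intro a b hab _
        have := pv_enum_lb t (s + 1) a b hab
        omega
    · -- target < s : item already (or never) emitted, head (if kept) goes to 'after'
      rw [pv_before_nil index target t (s+1) (by omega)]
      rw [if_neg (by omega : ¬ (s + 1 ≤ target ∧ target < s + 1 + (t.length : Int)))]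
      rw [if_neg (by omega : ¬ (s ≤ target ∧ target < s + ((t.length : Int) + 1)))]
      rw [if_neg (by omega : ¬ s = target)]
      by_cases hi : s = index
      · subst hi
        simp [(by omega : target ≤ s), List.append_assoc]
        intro a b hab _
        have := pv_enum_lb t (s + 1) a b hab
        omega
      · simp [hi, (by omega : target ≤ s), List.append_assoc]
        intro a b hab _
        have := pv_enum_lb t (s + 1) a b hab
        omega

-- the plain not-the-index filter splits into the 'before' and 'after' filters of pv_loop
theorem pv_split (index target : Int) (xs : List Int) : ∀ (s : Int),
    (PySem.List.enumerate xs s).filter (fun p => decide (p.1 ≠ index)) =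
    (PySem.List.enumerate xs s).filter
      (fun p => decide (p.1 ≠ index) && decide (p.1 < target)) ++
    (PySem.List.enumerate xs s).filter
      (fun p => decide (p.1 ≠ index) && decide (target ≤ p.1)) := by
  induction xs with
  | nil => intro s; simp [PySem.List.enumerate_nil]
  | cons x t ih =>
    intro s
    by_cases hst : s < target
    · rw [PySem.List.enumerate_cons]
      by_cases hi : s = index
      · simp [hi]
        simpa [hi] using ih (s + 1)
      · simp [hi, hst]
        simpa using ih (s + 1)
    · rw [pv_before_nil index target (x :: t) s (by omega)]
      rw [List.nil_append]
      apply List.filter_congr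
      intro p hp
      rcases p with ⟨a, b⟩
      have := pv_enum_lb (x :: t) s a b hp
      simp
      intro _
      omega

-- flattening the per-element singleton/empty buckets is the not-the-index filter
theorem pv_flat (index : Int) (l : List (Int × Int)) :
    l.flatMap (fun p => if p.1 ≠ index then [p.2] else []) =
    (l.filter (fun p => decide (p.1 ≠ index))).map Prod.snd := by
  induction l with
  | nil => rfl
  | cons x t ih =>
    rw [List.flatMap_cons, List.filter_cons, ih]
    by_cases hi : x.1 = index <;> simp [hi]

-- the not-the-index filter of the first t entries is the 'before' filter at target = s + t
theorem pv_take (index : Int) (xs : List Int) : ∀ (s : Int) (t : Nat) (target : Int), s + t = target →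
    ((PySem.List.enumerate xs s).take t).filter (fun p => decide (p.1 ≠ index)) =
    (PySem.List.enumerate xs s).filter
      (fun p => decide (p.1 ≠ index) && decide (p.1 < target)) := by
  induction xs with
  | nil => intro s t target _; simp [PySem.List.enumerate_nil]
  | cons x xt ih =>
    intro s t target htg
    cases t with
    | zero =>
      rw [pv_before_nil index target (x :: xt) s (by omega)]
      simp
    | succ t =>
      rw [PySem.List.enumerate_cons]
      rw [List.take_succ_cons, List.filter_cons, List.filter_cons]
      push_cast at htg
      rw [ih (s + 1) t target (by omega)]
      by_cases hi : s = index
      · simp [hi]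
      · simp [hi, (by omega : s < target)]

-- the not-the-index filter of the remaining entries is the 'after' filter at target = s + t
theorem pv_drop (index : Int) (xs : List Int) : ∀ (s : Int) (t : Nat) (target : Int), s + t = target →
    ((PySem.List.enumerate xs s).drop t).filter (fun p => decide (p.1 ≠ index)) =
    (PySem.List.enumerate xs s).filter
      (fun p => decide (p.1 ≠ index) && decide (target ≤ p.1)) := by
  induction xs with
  | nil => intro s t target _; simp [PySem.List.enumerate_nil]
  | cons x xt ih =>
    intro s t target htg
    rw [PySem.List.enumerate_cons]
    cases t with
    | zero =>
      rw [List.drop_zero]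
      apply Eq.symm
      apply List.filter_congr
      intro p hp
      rcases p with ⟨a, b⟩
      have := pv_enum_lb (x :: xt) s a b (by rw [PySem.List.enumerate_cons]; exact hp)
      simp
      intro _
      omega
    | succ t =>
      rw [List.drop_succ_cons, List.filter_cons]
      push_cast at htg
      rw [ih (s + 1) t target (by omega)]
      rw [if_neg (by simp; intro _; omega)]

-- ===== VERDICT (by name: the statement is the Claim_ definition above) =====
theorem list_move_spec : Claim_equal_list_move := by
  intro lst index target _ hpre
  unfold Spec_list_move list_move list_move_alt
  have hget : ∃ item, PySem.List.pyGet? lst index = some item := by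
    rcases h : PySem.List.pyGet? lst index with _ | item
    · exact absurd ((PySem.List.pyGet?_eq_none_iff lst index).mp h) (not_not_intro hpre)
    · exact ⟨item, rfl⟩
  rcases hget with ⟨item, hitem⟩
  rw [hitem]
  simp only
  rw [pv_loop item index target lst 0 []]
  set B0 := ((PySem.List.enumerate lst 0).map
      (fun p => if p.1 ≠ index then [p.2] else [])) ++ [[]] with hB0
  have hlenE : (PySem.List.enumerate lst 0).length = lst.length := by
    simp [PySem.List.length_enumerate]
  have hlenM : ((PySem.List.enumerate lst 0).map
      (fun p => if p.1 ≠ index then [p.2] else [])).length = lst.length := by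
    rw [List.length_map, hlenE]
  by_cases hmem : target ∈ PySem.List.pyRange 0 ((lst.length : Int) + 1) 1
  · rw [if_pos hmem]
    have htr : 0 ≤ target ∧ target < (lst.length : Int) + 1 := by
      simpa [PySem.List.mem_pyRange_one] using hmem
    have htt : ((target.toNat : Int)) = target := Int.toNat_of_nonneg htr.1
    have htn : target.toNat ≤ lst.length := by omega
    have htB : target.toNat < B0.length := by
      rw [hB0, List.length_append, hlenM]; simp; omega
    rw [← htt, PySem.List.pyGetD_natCast B0 target.toNat []]
    rw [List.getD_eq_getElem B0 [] htB]
    have hset : PySem.List.pySetD B0 ((target.toNat : Int)) ([item] ++ B0[target.toNat]) =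
        B0.set target.toNat ([item] ++ B0[target.toNat]) := by
      unfold PySem.List.pySetD
      rw [PySem.List.pySet?_natCast B0 target.toNat _ htB]
      rfl
    rw [hset]
    rw [List.set_eq_take_append_cons_drop, if_pos htB]
    rw [List.flatMap_append, List.flatMap_cons]
    simp only [id_eq, List.cons_append, List.append_assoc]
    have hdrop : B0[target.toNat] ++ (B0.drop (target.toNat + 1)).flatMap id =
        (B0.drop target.toNat).flatMap id := by
      conv_rhs => rw [← List.getElem_cons_drop htB]
      rw [List.flatMap_cons]
      rfl
    rw [hdrop]
    rw [hB0]
    rw [List.take_append_of_le_length (by rw [hlenM]; exact htn)]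
    rw [List.drop_append_of_le_length (by rw [hlenM]; exact htn)]
    rw [← List.map_take, List.flatMap_map]
    rw [List.flatMap_append]
    rw [← List.map_drop, List.flatMap_map]
    simp only [id_eq]
    rw [pv_flat, pv_flat]
    rw [pv_take index lst 0 target.toNat target (by omega)]
    rw [pv_drop index lst 0 target.toNat target (by omega)]
    rw [htt]
    by_cases ht : target = (lst.length : Int)
    · rw [if_pos ht]
      rw [if_neg (by omega : ¬ ((0:Int) ≤ target ∧ target < 0 + (lst.length : Int)))]
      rw [pv_after_nil index target lst 0 (by omega)]
      simp
    · rw [if_neg ht]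
      rw [if_pos (by omega : (0:Int) ≤ target ∧ target < 0 + (lst.length : Int))]
      simp
  · rw [if_neg hmem]
    have htr : target < 0 ∨ (lst.length : Int) + 1 ≤ target := by
      by_contra h
      exact hmem (by rw [PySem.List.mem_pyRange_one]; omega)
    have h0 : (0:Int) ≤ (lst.length : Int) := Int.natCast_nonneg _
    rw [if_neg (by omega : ¬ ((0:Int) ≤ target ∧ target < 0 + (lst.length : Int)))]
    rw [if_neg (by omega : ¬ target = (lst.length : Int))]
    rw [hB0, List.flatMap_append, List.flatMap_map]
    simp only [id_eq]
    rw [pv_flat, pv_split index target lst 0, List.map_append]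
    simp
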